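-- pv_equiv track=rewrite | github.com/Sgzhengg/xuefeng_volunteer | backend/scripts/import_official_guangdong_2025.py | _calculate_rank_distribution
-- ===== SOURCE A (Python) =====
-- from typing import List, Dict, Any, Optional
--
-- def _calculate_rank_distribution(records: List[Dict]) -> Dict[str, int]:
--     """计算位次段分布"""
--     ranges = {
--         "1-5000": 0,
--         "5001-10000": 0,
--         "10001-20000": 0,
--         "20001-50000": 0,
--         "50001-100000": 0,
--         "100001-150000": 0,
--         "150000+": 0,
--     }
--
--     for r in records:
--         rank = r.get("min_rank", 0)
--         if rank <= 5000:
--             ranges["1-5000"] += 1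
--         elif rank <= 10000:
--             ranges["5001-10000"] += 1
--         elif rank <= 20000:
--             ranges["10001-20000"] += 1
--         elif rank <= 50000:
--             ranges["20001-50000"] += 1
--         elif rank <= 100000:
--             ranges["50001-100000"] += 1
--         elif rank <= 150000:
--             ranges["100001-150000"] += 1
--         else:
--             ranges["150000+"] += 1
--
--     return {k: v for k, v in ranges.items() if v > 0}
-- ===== SOURCE B (Python) =====
-- from typing import List, Dict, Any, Optional
--
-- def _calculate_rank_distribution(records: List[Dict]) -> Dict[str, int]:
--     """计算位次段分布 (staged: one counting pass over the ranks per bin, instead of one bucketing pass over records)"""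
--     bins = [
--         ("1-5000",        lambda x: x <= 5000),
--         ("5001-10000",    lambda x: 5000 < x <= 10000),
--         ("10001-20000",   lambda x: 10000 < x <= 20000),
--         ("20001-50000",   lambda x: 20000 < x <= 50000),
--         ("50001-100000",  lambda x: 50000 < x <= 100000),
--         ("100001-150000", lambda x: 100000 < x <= 150000),
--         ("150000+",       lambda x: 150000 < x),
--     ]
--     ranks = [r.get("min_rank", 0) for r in records]
--     out = {}
--     for label, pred in bins:
--         c = sum(1 for x in ranks if pred(x))
--         if c > 0:
--             out[label] = c
--     return out
-- ===== Notes on version B (the rewrite author's own statement) =====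
-- stated objective: alternative
-- what changed: Inverts the loop structure: instead of A's single bucketing pass that routes each record through a 7-way if/elif ladder into a named dict, B extracts the ranks once and then, per bin, runs a separate counting pass with that bin's interval predicate, emitting the entry immediately if its count is positive.
import Mathlib
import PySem

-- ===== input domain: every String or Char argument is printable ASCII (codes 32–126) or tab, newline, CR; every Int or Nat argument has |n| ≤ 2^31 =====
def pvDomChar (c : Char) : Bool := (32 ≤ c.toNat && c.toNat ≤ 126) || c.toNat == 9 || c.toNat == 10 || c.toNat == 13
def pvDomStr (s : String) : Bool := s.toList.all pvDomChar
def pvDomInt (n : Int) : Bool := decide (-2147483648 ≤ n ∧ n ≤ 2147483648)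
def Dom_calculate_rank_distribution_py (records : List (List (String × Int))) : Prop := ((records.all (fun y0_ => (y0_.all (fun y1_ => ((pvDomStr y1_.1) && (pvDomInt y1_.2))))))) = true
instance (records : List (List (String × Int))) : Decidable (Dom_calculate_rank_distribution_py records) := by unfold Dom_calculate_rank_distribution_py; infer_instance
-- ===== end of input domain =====

-- B inverts the loop structure: A buckets each record through an if/elif ladder in one pass over records;
-- B extracts the ranks once and runs one counting pass per bin (alternative decomposition, same cost class).

-- r.get("min_rank", 0) — used by both Pythons
def pvRankOf (r : List (String × Int)) : Int := (PySem.Dict.mk r).getD "min_rank" 0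

-- ===== PORT A =====
def rdStep (d : PySem.Dict String Int) (r : List (String × Int)) : PySem.Dict String Int :=
  let rank := pvRankOf r
  if rank ≤ 5000 then d.modify "1-5000" 0 (· + 1)
  else if rank ≤ 10000 then d.modify "5001-10000" 0 (· + 1)
  else if rank ≤ 20000 then d.modify "10001-20000" 0 (· + 1)
  else if rank ≤ 50000 then d.modify "20001-50000" 0 (· + 1)
  else if rank ≤ 100000 then d.modify "50001-100000" 0 (· + 1)
  else if rank ≤ 150000 then d.modify "100001-150000" 0 (· + 1)
  else d.modify "150000+" 0 (· + 1)

def calculate_rank_distribution_py (records : List (List (String × Int))) : List (String × Int) :=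
  let ranges : PySem.Dict String Int := PySem.Dict.mk
    [("1-5000", 0), ("5001-10000", 0), ("10001-20000", 0), ("20001-50000", 0),
     ("50001-100000", 0), ("100001-150000", 0), ("150000+", 0)]
  let final := records.foldl rdStep ranges
  final.items.filter (fun kv => decide (kv.2 > 0))

-- ===== PORT B =====
-- the bins table of Source B: label plus interval predicate
def pvBins : List (String × (Int → Bool)) :=
  [("1-5000",        fun x => decide (x ≤ 5000)),
   ("5001-10000",    fun x => decide (5000 < x) && decide (x ≤ 10000)),
   ("10001-20000",   fun x => decide (10000 < x) && decide (x ≤ 20000)),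
   ("20001-50000",   fun x => decide (20000 < x) && decide (x ≤ 50000)),
   ("50001-100000",  fun x => decide (50000 < x) && decide (x ≤ 100000)),
   ("100001-150000", fun x => decide (100000 < x) && decide (x ≤ 150000)),
   ("150000+",       fun x => decide (150000 < x))]

-- Source B's per-bin loop; the dict 'out' starts empty and only ever receives fresh keys,
-- so its insertion is the list append below.
def calculate_rank_distribution_py_alt (records : List (List (String × Int))) : List (String × Int) :=
  let ranks := records.map pvRankOf
  pvBins.foldl
    (fun out lp =>
      let c : Int := (ranks.countP lp.2 : Nat)
      if c > 0 then out ++ [(lp.1, c)] else out) []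

-- ===== PRECONDITION & SPEC =====
def Spec_calculate_rank_distribution_py (records : List (List (String × Int))) (out : List (String × Int)) : Prop := out = calculate_rank_distribution_py_alt records
instance (records : List (List (String × Int))) (out : List (String × Int)) : Decidable (Spec_calculate_rank_distribution_py records out) := by unfold Spec_calculate_rank_distribution_py; infer_instance

-- ===== CLAIM (what is proved, stated in full; the proofs are below) =====
def Claim_equal_calculate_rank_distribution_py : Prop := ∀ (records : List (List (String × Int))), Dom_calculate_rank_distribution_py records → Spec_calculate_rank_distribution_py records (calculate_rank_distribution_py records)

-- ===== LEMMAS AND PROOFS =====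

def pvLabels : List String :=
  ["1-5000", "5001-10000", "10001-20000", "20001-50000", "50001-100000", "100001-150000", "150000+"]

-- count of ranks in records falling in bin i
def pvCnt (i : Nat) (recs : List (List (String × Int))) : Int :=
  (((recs.map pvRankOf).countP (pvBins.getD i ("", fun _ => false)).2 : Nat) : Int)

lemma pvCnt_cons (i : Nat) (r : List (String × Int)) (recs : List (List (String × Int))) :
    pvCnt i (r :: recs)
      = (if (pvBins.getD i ("", fun _ => false)).2 (pvRankOf r) then 1 else 0) + pvCnt i recs := by
  simp only [pvCnt, List.map_cons, List.countP_cons]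
  split <;> simp_all
  omega

-- Loop invariant: A's dict always holds the seven fixed keys in order, each value the start value plus
-- the number of remaining records whose rank satisfies that bin's predicate.
lemma rd_loop_items : ∀ (recs : List (List (String × Int))) (c0 c1 c2 c3 c4 c5 c6 : Int),
    (recs.foldl rdStep (PySem.Dict.mk
      [("1-5000", c0), ("5001-10000", c1), ("10001-20000", c2), ("20001-50000", c3),
       ("50001-100000", c4), ("100001-150000", c5), ("150000+", c6)])).items
    = pvLabels.zip
      [c0 + pvCnt 0 recs, c1 + pvCnt 1 recs, c2 + pvCnt 2 recs, c3 + pvCnt 3 recs,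
       c4 + pvCnt 4 recs, c5 + pvCnt 5 recs, c6 + pvCnt 6 recs] := by
  intro recs
  induction recs with
  | nil => intros; simp [pvCnt]; rfl
  | cons r recs ih =>
    intro c0 c1 c2 c3 c4 c5 c6
    simp only [List.foldl_cons]
    by_cases h1 : pvRankOf r ≤ 5000
    · have hA : rdStep (PySem.Dict.mk [("1-5000", c0), ("5001-10000", c1), ("10001-20000", c2), ("20001-50000", c3), ("50001-100000", c4), ("100001-150000", c5), ("150000+", c6)]) r = PySem.Dict.mk [("1-5000", c0 + 1), ("5001-10000", c1), ("10001-20000", c2), ("20001-50000", c3), ("50001-100000", c4), ("100001-150000", c5), ("150000+", c6)] := by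
        simp [rdStep, h1, PySem.Dict.modify, PySem.Dict.insert, PySem.Dict.getD, PySem.Dict.get?, PySem.Dict.contains]
      rw [hA, ih]
      simp only [pvCnt_cons, pvBins, List.getD, List.getElem?_cons_zero, List.getElem?_cons_succ,
        Option.getD_some, decide_eq_true h1,
        decide_eq_false (show ¬(5000 < pvRankOf r) by omega),
        decide_eq_false (show ¬(10000 < pvRankOf r) by omega),
        decide_eq_false (show ¬(20000 < pvRankOf r) by omega),
        decide_eq_false (show ¬(50000 < pvRankOf r) by omega),
        decide_eq_false (show ¬(100000 < pvRankOf r) by omega),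
        decide_eq_false (show ¬(150000 < pvRankOf r) by omega)]
      simp [pvLabels]
      omega
    by_cases h2 : pvRankOf r ≤ 10000
    · have hA : rdStep (PySem.Dict.mk [("1-5000", c0), ("5001-10000", c1), ("10001-20000", c2), ("20001-50000", c3), ("50001-100000", c4), ("100001-150000", c5), ("150000+", c6)]) r = PySem.Dict.mk [("1-5000", c0), ("5001-10000", c1 + 1), ("10001-20000", c2), ("20001-50000", c3), ("50001-100000", c4), ("100001-150000", c5), ("150000+", c6)] := by
        simp [rdStep, h1, h2, PySem.Dict.modify, PySem.Dict.insert, PySem.Dict.getD, PySem.Dict.get?, PySem.Dict.contains]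
      rw [hA, ih]
      simp only [pvCnt_cons, pvBins, List.getD, List.getElem?_cons_zero, List.getElem?_cons_succ,
        Option.getD_some, decide_eq_true h2,
        decide_eq_true (show (5000:Int) < pvRankOf r by omega),
        decide_eq_false h1,
        decide_eq_false (show ¬(10000 < pvRankOf r) by omega),
        decide_eq_false (show ¬(20000 < pvRankOf r) by omega),
        decide_eq_false (show ¬(50000 < pvRankOf r) by omega),
        decide_eq_false (show ¬(100000 < pvRankOf r) by omega),
        decide_eq_false (show ¬(150000 < pvRankOf r) by omega)]
      simp [pvLabels]
      omega
    by_cases h3 : pvRankOf r ≤ 20000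
    · have hA : rdStep (PySem.Dict.mk [("1-5000", c0), ("5001-10000", c1), ("10001-20000", c2), ("20001-50000", c3), ("50001-100000", c4), ("100001-150000", c5), ("150000+", c6)]) r = PySem.Dict.mk [("1-5000", c0), ("5001-10000", c1), ("10001-20000", c2 + 1), ("20001-50000", c3), ("50001-100000", c4), ("100001-150000", c5), ("150000+", c6)] := by
        simp [rdStep, h1, h2, h3, PySem.Dict.modify, PySem.Dict.insert, PySem.Dict.getD, PySem.Dict.get?, PySem.Dict.contains]
      rw [hA, ih]
      simp only [pvCnt_cons, pvBins, List.getD, List.getElem?_cons_zero, List.getElem?_cons_succ,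
        Option.getD_some, decide_eq_true h3,
        decide_eq_true (show (10000:Int) < pvRankOf r by omega),
        decide_eq_false h1,
        decide_eq_false (show ¬(pvRankOf r ≤ 10000) by omega),
        decide_eq_false (show ¬(20000 < pvRankOf r) by omega),
        decide_eq_false (show ¬(50000 < pvRankOf r) by omega),
        decide_eq_false (show ¬(100000 < pvRankOf r) by omega),
        decide_eq_false (show ¬(150000 < pvRankOf r) by omega)]
      simp [pvLabels]
      omega
    by_cases h4 : pvRankOf r ≤ 50000
    · have hA : rdStep (PySem.Dict.mk [("1-5000", c0), ("5001-10000", c1), ("10001-20000", c2), ("20001-50000", c3), ("50001-100000", c4), ("100001-150000", c5), ("150000+", c6)]) r = PySem.Dict.mk [("1-5000", c0), ("5001-10000", c1), ("10001-20000", c2), ("20001-50000", c3 + 1), ("50001-100000", c4), ("100001-150000", c5), ("150000+", c6)] := by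
        simp [rdStep, h1, h2, h3, h4, PySem.Dict.modify, PySem.Dict.insert, PySem.Dict.getD, PySem.Dict.get?, PySem.Dict.contains]
      rw [hA, ih]
      simp only [pvCnt_cons, pvBins, List.getD, List.getElem?_cons_zero, List.getElem?_cons_succ,
        Option.getD_some, decide_eq_true h4,
        decide_eq_true (show (20000:Int) < pvRankOf r by omega),
        decide_eq_false h1,
        decide_eq_false (show ¬(pvRankOf r ≤ 10000) by omega),
        decide_eq_false (show ¬(pvRankOf r ≤ 20000) by omega),
        decide_eq_false (show ¬(50000 < pvRankOf r) by omega),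
        decide_eq_false (show ¬(100000 < pvRankOf r) by omega),
        decide_eq_false (show ¬(150000 < pvRankOf r) by omega)]
      simp [pvLabels]
      omega
    by_cases h5 : pvRankOf r ≤ 100000
    · have hA : rdStep (PySem.Dict.mk [("1-5000", c0), ("5001-10000", c1), ("10001-20000", c2), ("20001-50000", c3), ("50001-100000", c4), ("100001-150000", c5), ("150000+", c6)]) r = PySem.Dict.mk [("1-5000", c0), ("5001-10000", c1), ("10001-20000", c2), ("20001-50000", c3), ("50001-100000", c4 + 1), ("100001-150000", c5), ("150000+", c6)] := by
        simp [rdStep, h1, h2, h3, h4, h5, PySem.Dict.modify, PySem.Dict.insert, PySem.Dict.getD, PySem.Dict.get?, PySem.Dict.contains]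
      rw [hA, ih]
      simp only [pvCnt_cons, pvBins, List.getD, List.getElem?_cons_zero, List.getElem?_cons_succ,
        Option.getD_some, decide_eq_true h5,
        decide_eq_true (show (50000:Int) < pvRankOf r by omega),
        decide_eq_false h1,
        decide_eq_false (show ¬(pvRankOf r ≤ 10000) by omega),
        decide_eq_false (show ¬(pvRankOf r ≤ 20000) by omega),
        decide_eq_false (show ¬(pvRankOf r ≤ 50000) by omega),
        decide_eq_false (show ¬(100000 < pvRankOf r) by omega),
        decide_eq_false (show ¬(150000 < pvRankOf r) by omega)]
      simp [pvLabels]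
      omega
    by_cases h6 : pvRankOf r ≤ 150000
    · have hA : rdStep (PySem.Dict.mk [("1-5000", c0), ("5001-10000", c1), ("10001-20000", c2), ("20001-50000", c3), ("50001-100000", c4), ("100001-150000", c5), ("150000+", c6)]) r = PySem.Dict.mk [("1-5000", c0), ("5001-10000", c1), ("10001-20000", c2), ("20001-50000", c3), ("50001-100000", c4), ("100001-150000", c5 + 1), ("150000+", c6)] := by
        simp [rdStep, h1, h2, h3, h4, h5, h6, PySem.Dict.modify, PySem.Dict.insert, PySem.Dict.getD, PySem.Dict.get?, PySem.Dict.contains]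
      rw [hA, ih]
      simp only [pvCnt_cons, pvBins, List.getD, List.getElem?_cons_zero, List.getElem?_cons_succ,
        Option.getD_some, decide_eq_true h6,
        decide_eq_true (show (100000:Int) < pvRankOf r by omega),
        decide_eq_false h1,
        decide_eq_false (show ¬(pvRankOf r ≤ 10000) by omega),
        decide_eq_false (show ¬(pvRankOf r ≤ 20000) by omega),
        decide_eq_false (show ¬(pvRankOf r ≤ 50000) by omega),
        decide_eq_false (show ¬(pvRankOf r ≤ 100000) by omega),
        decide_eq_false (show ¬(150000 < pvRankOf r) by omega)]
      simp [pvLabels]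
      omega
    have hA : rdStep (PySem.Dict.mk [("1-5000", c0), ("5001-10000", c1), ("10001-20000", c2), ("20001-50000", c3), ("50001-100000", c4), ("100001-150000", c5), ("150000+", c6)]) r = PySem.Dict.mk [("1-5000", c0), ("5001-10000", c1), ("10001-20000", c2), ("20001-50000", c3), ("50001-100000", c4), ("100001-150000", c5), ("150000+", c6 + 1)] := by
      simp [rdStep, h1, h2, h3, h4, h5, h6, PySem.Dict.modify, PySem.Dict.insert, PySem.Dict.getD, PySem.Dict.get?, PySem.Dict.contains]
    rw [hA, ih]
    simp only [pvCnt_cons, pvBins, List.getD, List.getElem?_cons_zero, List.getElem?_cons_succ,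
      Option.getD_some,
      decide_eq_true (show (150000:Int) < pvRankOf r by omega),
      decide_eq_false h1,
      decide_eq_false (show ¬(pvRankOf r ≤ 10000) by omega),
      decide_eq_false (show ¬(pvRankOf r ≤ 20000) by omega),
      decide_eq_false (show ¬(pvRankOf r ≤ 50000) by omega),
      decide_eq_false (show ¬(pvRankOf r ≤ 100000) by omega),
      decide_eq_false (show ¬(pvRankOf r ≤ 150000) by omega)]
    simp [pvLabels]
    omega

-- ===== VERDICT (by name: the statement is the Claim_ definition above) =====
theorem calculate_rank_distribution_py_spec : Claim_equal_calculate_rank_distribution_py := by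
  intro records _
  unfold Spec_calculate_rank_distribution_py calculate_rank_distribution_py
  dsimp only []
  rw [rd_loop_items]
  have hB : calculate_rank_distribution_py_alt records
      = (pvBins.map (fun lp => ((lp.1, (((records.map pvRankOf).countP lp.2 : Nat) : Int)) : String × Int))).foldl
          (fun out x => if x.2 > 0 then out ++ [x] else out) [] := by
    unfold calculate_rank_distribution_py_alt
    dsimp only []
    exact (List.foldl_map
      (f := fun lp : String × (Int → Bool) =>
        ((lp.1, (((records.map pvRankOf).countP lp.2 : Nat) : Int)) : String × Int))
      (g := fun out x => if x.2 > 0 then out ++ [x] else out)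
      (l := pvBins) (init := [])).symm
  rw [hB, PySem.List.foldl_append_ite_eq_filter]
  simp only [zero_add, List.nil_append]
  rfl
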